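-- pv_equiv track=rewrite | github.com/jmagar/crawly-mcp | crawler_mcp/core/rag/chunking.py | find_sentence_boundary
-- ===== SOURCE A (Python) =====
-- def find_sentence_boundary(search_text: str, ideal_end: int) -> int | None:
--     """Find sentence ending boundary."""
--     sentence_patterns = [". ", "! ", "? ", ".\n", "!\n", "?\n"]
--     sentence_breaks = []
--     for pattern in sentence_patterns:
--         sentence_breaks.extend(
--             [
--                 i + len(pattern)
--                 for i in range(len(search_text) - len(pattern))
--                 if search_text[i : i + len(pattern)] == pattern
--             ]
--         )
--     suitable_breaks = [
--         b for b in sentence_breaks if ideal_end - 50 <= b <= ideal_end + 50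
--     ]
--     return max(suitable_breaks) if suitable_breaks else None
-- ===== SOURCE B (Python) =====
-- def find_sentence_boundary(search_text: str, ideal_end: int) -> int | None:
--     """Find sentence ending boundary (single bounded reverse scan, early exit)."""
--     patterns = (". ", "! ", "? ", ".\n", "!\n", "?\n")
--     hi = min(ideal_end + 50, len(search_text) - 1)
--     lo = max(ideal_end - 50, 2)
--     for b in range(hi, lo - 1, -1):
--         if search_text[b - 2:b] in patterns:
--             return b
--     return None
-- ===== Notes on version B (the rewrite author's own statement) =====
-- stated objective: faster
-- what changed: Replaces six full-text passes that collect every sentence-break position and then filter and take the max with a single reverse scan over the <=101 candidate positions in the window, returning the first (hence latest) position whose preceding two characters form a sentence end.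
import Mathlib
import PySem

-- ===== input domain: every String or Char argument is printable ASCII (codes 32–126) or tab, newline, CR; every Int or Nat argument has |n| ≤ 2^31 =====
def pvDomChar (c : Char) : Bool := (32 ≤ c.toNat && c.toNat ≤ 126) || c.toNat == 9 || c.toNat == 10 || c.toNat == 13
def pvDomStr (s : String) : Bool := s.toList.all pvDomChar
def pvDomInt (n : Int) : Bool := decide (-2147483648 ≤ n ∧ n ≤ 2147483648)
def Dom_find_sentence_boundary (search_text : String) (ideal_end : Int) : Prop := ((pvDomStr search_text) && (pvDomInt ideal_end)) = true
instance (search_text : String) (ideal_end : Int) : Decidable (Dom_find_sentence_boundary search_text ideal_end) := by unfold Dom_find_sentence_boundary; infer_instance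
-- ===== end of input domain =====

-- B replaces A's six full-text collect-all passes by one bounded reverse scan with early
-- exit over the candidate window (objective: faster; measured on the timing inputs).

-- the six sentence-ending patterns (shared literal constant of both programs)
def pvPatterns : List (List Char) :=
  [['.', ' '], ['!', ' '], ['?', ' '], ['.', '\n'], ['!', '\n'], ['?', '\n']]

-- ===== PORT A =====
def find_sentence_boundary (search_text : String) (ideal_end : Int) : Option Int :=
  let cs := search_text.toList
  let sentence_breaks : List Int := pvPatterns.foldl (fun acc pattern =>
    acc ++ ((PySem.List.pyRange 0 ((cs.length : Int) - (pattern.length : Int)) 1).filter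
        (fun i => decide (PySem.List.slice cs (some i) (some (i + (pattern.length : Int))) = pattern))).map
      (fun i => i + (pattern.length : Int))) []
  let suitable_breaks := sentence_breaks.filter
    (fun b => decide (ideal_end - 50 ≤ b ∧ b ≤ ideal_end + 50))
  PySem.List.max? suitable_breaks (fun x => x)

-- ===== PORT B =====
def find_sentence_boundary_alt (search_text : String) (ideal_end : Int) : Option Int :=
  let cs := search_text.toList
  let hi := min (ideal_end + 50) ((cs.length : Int) - 1)
  let lo := max (ideal_end - 50) 2
  (PySem.List.pyRange hi (lo - 1) (-1)).find?
    (fun b => decide (PySem.List.slice cs (some (b - 2)) (some b) ∈ pvPatterns))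

-- ===== PRECONDITION & SPEC =====
def Spec_find_sentence_boundary (search_text : String) (ideal_end : Int) (out : Option Int) : Prop := out = find_sentence_boundary_alt search_text ideal_end
instance (search_text : String) (ideal_end : Int) (out : Option Int) : Decidable (Spec_find_sentence_boundary search_text ideal_end out) := by unfold Spec_find_sentence_boundary; infer_instance

-- ===== CLAIM (what is proved, stated in full; the proofs are below) =====
def Claim_equal_find_sentence_boundary : Prop := ∀ (search_text : String) (ideal_end : Int), Dom_find_sentence_boundary search_text ideal_end → Spec_find_sentence_boundary search_text ideal_end (find_sentence_boundary search_text ideal_end)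

-- ===== LEMMAS AND PROOFS =====

-- find? on a strictly decreasing list returns the greatest element satisfying the predicate
theorem find?_desc_isMax (L : List Int) (pred : Int → Bool) (hL : L.Pairwise (· > ·)) (m : Int)
    (h : L.find? pred = some m) :
    m ∈ L ∧ pred m = true ∧ ∀ y ∈ L, pred y = true → y ≤ m := by
  induction L with
  | nil => simp at h
  | cons a t ih =>
    rw [List.find?_cons] at h
    rcases List.pairwise_cons.mp hL with ⟨ha, ht⟩
    by_cases hp : pred a = true
    · simp [hp] at h
      subst h
      refine ⟨List.mem_cons_self, hp, ?_⟩
      intro y hy _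
      rcases List.mem_cons.mp hy with rfl | hyt
      · exact le_refl _
      · exact le_of_lt (ha y hyt)
    · simp [hp] at h
      rcases ih ht h with ⟨hm, hpm, hmax⟩
      refine ⟨List.mem_cons_of_mem _ hm, hpm, ?_⟩
      intro y hy hpy
      rcases List.mem_cons.mp hy with rfl | hyt
      · exact absurd hpy hp
      · exact hmax y hyt hpy

-- membership in A's collected break list
theorem mem_breaks (cs : List Char) (b : Int) :
    b ∈ pvPatterns.foldl (fun acc pattern =>
        acc ++ ((PySem.List.pyRange 0 ((cs.length : Int) - (pattern.length : Int)) 1).filter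
            (fun i => decide (PySem.List.slice cs (some i) (some (i + (pattern.length : Int))) = pattern))).map
          (fun i => i + (pattern.length : Int))) [] ↔
      (2 ≤ b ∧ b ≤ (cs.length : Int) - 1 ∧
        PySem.List.slice cs (some (b - 2)) (some b) ∈ pvPatterns) := by
  simp only [pvPatterns, List.foldl, List.nil_append, List.mem_append, List.mem_map,
    List.mem_filter, PySem.List.mem_pyRange_one, decide_eq_true_eq, List.mem_cons,
    List.not_mem_nil, or_false]
  norm_num
  constructor
  · rintro (((((h | h) | h) | h) | h) | h) <;>
    · obtain ⟨i, ⟨⟨h0, hn⟩, hs⟩, rfl⟩ := h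
      refine ⟨by omega, by omega, ?_⟩
      have hi : i + 2 - 2 = i := by omega
      rw [hi]
      tauto
  · rintro ⟨h2, hn, hs⟩
    have hb : b - 2 + 2 = b := by omega
    have mk : ∀ p : List Char, PySem.List.slice cs (some (b - 2)) (some b) = p →
        ∃ a : Int, ((0 ≤ a ∧ a < (cs.length : Int) - 2) ∧
          PySem.List.slice cs (some a) (some (a + 2)) = p) ∧ a + 2 = b := by
      intro p hp
      exact ⟨b - 2, ⟨⟨by omega, by omega⟩, by rw [hb]; exact hp⟩, hb⟩
    rcases hs with hs | hs | hs | hs | hs | hs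
    · exact Or.inl (Or.inl (Or.inl (Or.inl (Or.inl (mk _ hs)))))
    · exact Or.inl (Or.inl (Or.inl (Or.inl (Or.inr (mk _ hs)))))
    · exact Or.inl (Or.inl (Or.inl (Or.inr (mk _ hs))))
    · exact Or.inl (Or.inl (Or.inr (mk _ hs)))
    · exact Or.inl (Or.inr (mk _ hs))
    · exact Or.inr (mk _ hs)

-- the two computations agree, stated over the character list
theorem core_eq (cs : List Char) (ideal_end : Int) :
    PySem.List.max? ((pvPatterns.foldl (fun acc pattern =>
        acc ++ ((PySem.List.pyRange 0 ((cs.length : Int) - (pattern.length : Int)) 1).filter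
            (fun i => decide (PySem.List.slice cs (some i) (some (i + (pattern.length : Int))) = pattern))).map
          (fun i => i + (pattern.length : Int))) []).filter
        (fun b => decide (ideal_end - 50 ≤ b ∧ b ≤ ideal_end + 50))) (fun x => x) =
      (PySem.List.pyRange (min (ideal_end + 50) ((cs.length : Int) - 1)) (max (ideal_end - 50) 2 - 1) (-1)).find?
        (fun b => decide (PySem.List.slice cs (some (b - 2)) (some b) ∈ pvPatterns)) := by
  set pred : Int → Bool :=
    fun b => decide (PySem.List.slice cs (some (b - 2)) (some b) ∈ pvPatterns) with hpred
  set L : List Int := PySem.List.pyRange (min (ideal_end + 50) ((cs.length : Int) - 1))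
      (max (ideal_end - 50) 2 - 1) (-1) with hL
  set S : List Int := (pvPatterns.foldl (fun acc pattern =>
      acc ++ ((PySem.List.pyRange 0 ((cs.length : Int) - (pattern.length : Int)) 1).filter
          (fun i => decide (PySem.List.slice cs (some i) (some (i + (pattern.length : Int))) = pattern))).map
        (fun i => i + (pattern.length : Int))) []).filter
      (fun b => decide (ideal_end - 50 ≤ b ∧ b ≤ ideal_end + 50)) with hS
  have hmemL : ∀ b : Int, b ∈ L ↔
      max (ideal_end - 50) 2 ≤ b ∧ b ≤ min (ideal_end + 50) ((cs.length : Int) - 1) := by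
    intro b
    rw [hL, PySem.List.mem_pyRange_neg_one]
    omega
  have hdesc : L.Pairwise (· > ·) := by
    rw [hL, PySem.List.pyRange_neg_one_eq_reverse, List.pairwise_reverse]
    exact PySem.List.pairwise_lt_pyRange_one _ _
  have hmemS : ∀ b : Int, b ∈ S ↔ (b ∈ L ∧ pred b = true) := by
    intro b
    rw [hS, List.mem_filter, mem_breaks, hmemL, hpred]
    simp only [decide_eq_true_eq]
    constructor
    · rintro ⟨⟨h2, hn1, hs⟩, hw⟩; exact ⟨⟨by omega, by omega⟩, hs⟩
    · rintro ⟨⟨hl, hh⟩, hs⟩; exact ⟨⟨by omega, by omega, hs⟩, by omega⟩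
  rcases hfind : L.find? pred with _ | m
  · -- B finds nothing: nothing in the window matches, so S is empty and A returns none
    have hSnil : S = [] := by
      rw [List.eq_nil_iff_forall_not_mem]
      intro b hb
      rcases (hmemS b).mp hb with ⟨hbL, hbp⟩
      exact (List.find?_eq_none.mp hfind b hbL) hbp
    rw [hSnil]
    simp [PySem.List.max?]
  · rcases find?_desc_isMax L pred hdesc m hfind with ⟨hmL, hmp, hmax⟩
    have hmS : m ∈ S := (hmemS m).mpr ⟨hmL, hmp⟩
    have hne : S ≠ [] := fun h => by rw [h] at hmS; exact List.not_mem_nil hmS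
    rcases hmax? : PySem.List.max? S (fun x => x) with _ | m'
    · exact absurd ((PySem.List.max?_eq_none_iff S (fun x => x)).mp hmax?) hne
    · have hm'S : m' ∈ S := PySem.List.max?_mem hmax?
      have h1 : m ≤ m' := PySem.List.max?_isMax hmax? m hmS
      rcases (hmemS m').mp hm'S with ⟨hm'L, hm'p⟩
      have h2 : m' ≤ m := hmax m' hm'L hm'p
      rw [le_antisymm h2 h1]

-- ===== VERDICT (by name: the statement is the Claim_ definition above) =====
theorem find_sentence_boundary_spec : Claim_equal_find_sentence_boundary := by
  intro search_text ideal_end _dom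
  exact core_eq search_text.toList ideal_end
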